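-- pv_equiv track=rewrite | github.com/kentblock/CSES-problems | dynamic_programming/counting_towers/counting_towers.py | counting_towers
-- ===== SOURCE A (Python) =====
-- mod = 10 ** 9 + 7
--
-- def counting_towers(height):
--     dp = [[0 for _ in range(6)] for _ in range(height + 1)]
--     dp[0][3] = 1
--     for i in range(1, height + 1):
--         all = sum(dp[i - 1])
--         for j in range(6):
--             if j == 0:
--                 dp[i][j] = dp[i - 1][3] + dp[i - 1][5] + dp[i - 1][0]
--             elif j == 1:
--                 dp[i][j] = all - dp[i - 1][0]
--             elif j == 2:
--                 dp[i][j] = all - dp[i - 1][0]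
--             elif j == 3:
--                 dp[i][j] = dp[i - 1][5] + dp[i - 1][0] + dp[i - 1][3]
--             elif j == 4:
--                 dp[i][j] = all - dp[i - 1][0]
--             else:
--                 dp[i][j] = all - dp[i - 1][0]
--             dp[i][j] %= mod
--     return (dp[height][3] + dp[height][5]) % mod
-- ===== SOURCE B (Python) =====
-- mod = 10 ** 9 + 7
--
-- def counting_towers(height):
--     # Matrix power of the collapsed 2-state transition [[2,1],[1,4]];
--     # answer = sum of entries of M^(height-1) mod 1e9+7.
--     if height <= 0:
--         return 1
--
--     def mul(P, Q):
--         (a, b), (c, d) = P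
--         (e, f), (g, h) = Q
--         return (((a * e + b * g) % mod, (a * f + b * h) % mod),
--                 ((c * e + d * g) % mod, (c * f + d * h) % mod))
--
--     M = ((2, 1), (1, 4))
--     R = ((1, 0), (0, 1))
--     e = height - 1
--     while e:
--         if e & 1:
--             R = mul(R, M)
--         M = mul(M, M)
--         e >>= 1
--     (a, b), (c, d) = R
--     return (a + b + c + d) % mod
-- ===== Notes on version B (the rewrite author's own statement) =====
-- stated objective: faster
-- what changed: A fills an O(height)x6 DP table row by row; B collapses the six states to two (columns {0,3} and {1,2,4,5} are always equal) and computes the answer as the entry sum of the (height-1)-th power of the 2x2 transition matrix [[2,1],[1,4]] by binary exponentiation.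
-- outside the precondition, e.g. on counting_towers(-1): A raises IndexError, B returns 1
import Mathlib
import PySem

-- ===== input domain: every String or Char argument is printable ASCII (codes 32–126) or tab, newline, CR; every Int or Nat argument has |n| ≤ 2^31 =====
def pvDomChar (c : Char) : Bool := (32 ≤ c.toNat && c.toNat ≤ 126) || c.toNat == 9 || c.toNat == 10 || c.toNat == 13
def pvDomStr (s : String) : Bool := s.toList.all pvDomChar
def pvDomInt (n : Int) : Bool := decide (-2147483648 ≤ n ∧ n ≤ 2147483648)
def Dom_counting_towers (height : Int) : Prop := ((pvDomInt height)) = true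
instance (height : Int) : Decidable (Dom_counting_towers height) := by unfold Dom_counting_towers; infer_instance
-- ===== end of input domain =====

-- B replaces A's O(height) six-state DP table by binary exponentiation of the collapsed
-- 2x2 transition matrix [[2,1],[1,4]] mod 1e9+7 (O(log height)).

-- ===== PORT A =====
-- module constant 'mod'
def pvMod : Int := 10 ^ 9 + 7

-- loop body of A's 'for i in range(1, height + 1)'; all indices are nonnegative on
-- Pre_, so List.getD / Int.toNat are exact here, and '%' = Int.emod is exact since pvMod > 0.
def stepA (dp : List (List Int)) (i : Int) : List (List Int) :=
  let prev := dp.getD (i - 1).toNat []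
  let all := prev.sum
  let row :=
    (PySem.List.pyRange 0 6 1).foldl (fun row j =>
      let v : Int :=
        if j = 0 then prev.getD 3 0 + prev.getD 5 0 + prev.getD 0 0
        else if j = 1 then all - prev.getD 0 0
        else if j = 2 then all - prev.getD 0 0
        else if j = 3 then prev.getD 5 0 + prev.getD 0 0 + prev.getD 3 0
        else if j = 4 then all - prev.getD 0 0
        else all - prev.getD 0 0
      row.set j.toNat (PySem.Int.mod v pvMod)) (dp.getD i.toNat [])
  dp.set i.toNat row

def counting_towers (height : Int) : Int :=
  let dp0 : List (List Int) :=
    (PySem.List.pyRange 0 (height + 1) 1).map (fun _ =>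
      (PySem.List.pyRange 0 6 1).map (fun _ => (0 : Int)))
  let dp1 := dp0.set 0 ((dp0.getD 0 []).set 3 1)
  let dp := (PySem.List.pyRange 1 (height + 1) 1).foldl stepA dp1
  PySem.Int.mod ((dp.getD height.toNat []).getD 3 0 + (dp.getD height.toNat []).getD 5 0) pvMod

-- ===== PORT B =====
-- Source B's 'mul(P, Q)'
def matmulB (P Q : (Int × Int) × (Int × Int)) : (Int × Int) × (Int × Int) :=
  ((PySem.Int.mod (P.1.1 * Q.1.1 + P.1.2 * Q.2.1) pvMod,
    PySem.Int.mod (P.1.1 * Q.1.2 + P.1.2 * Q.2.2) pvMod),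
   (PySem.Int.mod (P.2.1 * Q.1.1 + P.2.2 * Q.2.1) pvMod,
    PySem.Int.mod (P.2.1 * Q.1.2 + P.2.2 * Q.2.2) pvMod))

-- Source B's 'while e:' loop; e ≥ 0 whenever the loop is reached, so e is carried as a Nat
-- (e & 1 = e % 2, e >>= 1 = e / 2 for nonnegative e: exact here).
def powAuxB (e : Nat) (M R : (Int × Int) × (Int × Int)) : (Int × Int) × (Int × Int) :=
  if e = 0 then R
  else powAuxB (e / 2) (matmulB M M) (if e % 2 = 1 then matmulB R M else R)

def counting_towers_alt (height : Int) : Int :=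
  if height ≤ 0 then 1
  else
    let R := powAuxB (height - 1).toNat ((2, 1), (1, 4)) ((1, 0), (0, 1))
    PySem.Int.mod (R.1.1 + R.1.2 + R.2.1 + R.2.2) pvMod

-- ===== PRECONDITION & SPEC =====
-- Pre_ keeps exactly the inputs on which A returns: for a negative height A's dp table
-- is empty and the first write into it raises IndexError.
def Pre_counting_towers (height : Int) : Prop := 0 ≤ height
instance (height : Int) : Decidable (Pre_counting_towers height) := by unfold Pre_counting_towers; infer_instance
def pvWitness_counting_towers : Int := (3)

def Spec_counting_towers (height : Int) (out : Int) : Prop := out = counting_towers_alt height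
instance (height : Int) (out : Int) : Decidable (Spec_counting_towers height out) := by unfold Spec_counting_towers; infer_instance

-- ===== CLAIM (what is proved, stated in full; the proofs are below) =====
def Claim_equal_counting_towers : Prop := ∀ (height : Int), Dom_counting_towers height → Pre_counting_towers height → Spec_counting_towers height (counting_towers height)

-- ===== LEMMAS AND PROOFS =====

-- pure (un-reduced) 2x2 integer matrices
def mulZ (P Q : (Int × Int) × (Int × Int)) : (Int × Int) × (Int × Int) :=
  ((P.1.1 * Q.1.1 + P.1.2 * Q.2.1, P.1.1 * Q.1.2 + P.1.2 * Q.2.2),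
   (P.2.1 * Q.1.1 + P.2.2 * Q.2.1, P.2.1 * Q.1.2 + P.2.2 * Q.2.2))

def redM (P : (Int × Int) × (Int × Int)) : (Int × Int) × (Int × Int) :=
  ((P.1.1 % pvMod, P.1.2 % pvMod), (P.2.1 % pvMod, P.2.2 % pvMod))

def pPowM (M : (Int × Int) × (Int × Int)) : Nat → (Int × Int) × (Int × Int)
  | 0 => ((1, 0), (0, 1))
  | n + 1 => mulZ (pPowM M n) M

def MatEq (P Q : (Int × Int) × (Int × Int)) : Prop :=
  P.1.1 % pvMod = Q.1.1 % pvMod ∧ P.1.2 % pvMod = Q.1.2 % pvMod ∧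
  P.2.1 % pvMod = Q.2.1 % pvMod ∧ P.2.2 % pvMod = Q.2.2 % pvMod

-- the collapsed scalar recurrence: xy n = (values in columns {0,3} resp. {1,2,4,5} of dp row n+1)
def xy : Nat → Int × Int
  | 0 => (1, 1)
  | n + 1 => ((2 * (xy n).1 + (xy n).2) % pvMod, ((xy n).1 + 4 * (xy n).2) % pvMod)

def row0 : List Int := [0, 0, 0, 1, 0, 0]
def zrow : List Int := [0, 0, 0, 0, 0, 0]
def rowXY (k : Nat) : List Int :=
  [(xy k).1, (xy k).2, (xy k).2, (xy k).1, (xy k).2, (xy k).2]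

def dpT (h n : Nat) : List (List Int) :=
  (List.range (h + 1)).map (fun k => if k = 0 then row0 else if k ≤ n then rowXY (k - 1) else zrow)

theorem pvMod_pos : (0 : Int) < pvMod := by norm_num [pvMod]

theorem modred (a : Int) : a % pvMod % pvMod = a % pvMod := Int.emod_emod_of_dvd a dvd_rfl

theorem modeq_add {a b a' b' : Int} (ha : a % pvMod = a' % pvMod) (hb : b % pvMod = b' % pvMod) :
    (a + b) % pvMod = (a' + b') % pvMod := by
  rw [Int.add_emod, ha, hb, ← Int.add_emod]

theorem modeq_mul {a b a' b' : Int} (ha : a % pvMod = a' % pvMod) (hb : b % pvMod = b' % pvMod) :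
    (a * b) % pvMod = (a' * b') % pvMod := by
  rw [Int.mul_emod, ha, hb, ← Int.mul_emod]

theorem matEq_refl (P : (Int × Int) × (Int × Int)) : MatEq P P := ⟨rfl, rfl, rfl, rfl⟩

theorem matEq_mulZ {P P' Q Q' : (Int × Int) × (Int × Int)}
    (hP : MatEq P P') (hQ : MatEq Q Q') : MatEq (mulZ P Q) (mulZ P' Q') := by
  obtain ⟨p1, p2, p3, p4⟩ := hP
  obtain ⟨q1, q2, q3, q4⟩ := hQ
  exact ⟨modeq_add (modeq_mul p1 q1) (modeq_mul p2 q3),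
         modeq_add (modeq_mul p1 q2) (modeq_mul p2 q4),
         modeq_add (modeq_mul p3 q1) (modeq_mul p4 q3),
         modeq_add (modeq_mul p3 q2) (modeq_mul p4 q4)⟩

theorem matEq_redM (P : (Int × Int) × (Int × Int)) : MatEq (redM P) P :=
  ⟨modred _, modred _, modred _, modred _⟩

theorem redM_congr {P Q : (Int × Int) × (Int × Int)} (h : MatEq P Q) : redM P = redM Q := by
  obtain ⟨h1, h2, h3, h4⟩ := h
  simp [redM, h1, h2, h3, h4]

theorem matmulB_eq (P Q : (Int × Int) × (Int × Int)) : matmulB P Q = redM (mulZ P Q) := by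
  simp [matmulB, mulZ, redM, PySem.Int.mod_eq_emod_of_pos pvMod_pos]

theorem mulZ_assoc (A B C : (Int × Int) × (Int × Int)) :
    mulZ (mulZ A B) C = mulZ A (mulZ B C) := by
  obtain ⟨⟨a, b⟩, c, d⟩ := A
  obtain ⟨⟨e, f⟩, g, h⟩ := B
  obtain ⟨⟨i, j⟩, k, l⟩ := C
  simp [mulZ, Prod.ext_iff]
  refine ⟨⟨by ring, by ring⟩, by ring, by ring⟩

theorem one_mulZ (X : (Int × Int) × (Int × Int)) : mulZ ((1, 0), (0, 1)) X = X := by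
  obtain ⟨⟨a, b⟩, c, d⟩ := X
  simp [mulZ]

theorem mulZ_one (X : (Int × Int) × (Int × Int)) : mulZ X ((1, 0), (0, 1)) = X := by
  obtain ⟨⟨a, b⟩, c, d⟩ := X
  simp [mulZ]

theorem pPowM_succ' (M : (Int × Int) × (Int × Int)) (k : Nat) :
    pPowM M (k + 1) = mulZ M (pPowM M k) := by
  induction k with
  | zero => simp [pPowM, one_mulZ, mulZ_one]
  | succ k ih =>
      calc pPowM M (k + 1 + 1) = mulZ (pPowM M (k + 1)) M := rfl
        _ = mulZ (mulZ M (pPowM M k)) M := by rw [ih]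
        _ = mulZ M (mulZ (pPowM M k) M) := mulZ_assoc M (pPowM M k) M
        _ = mulZ M (pPowM M (k + 1)) := rfl

theorem pPowM_congr {M M' : (Int × Int) × (Int × Int)} (h : MatEq M M') (k : Nat) :
    MatEq (pPowM M k) (pPowM M' k) := by
  induction k with
  | zero => exact matEq_refl _
  | succ k ih => exact matEq_mulZ ih h

theorem pPowM_sq (M : (Int × Int) × (Int × Int)) (k : Nat) :
    pPowM (mulZ M M) k = pPowM M (2 * k) := by
  induction k with
  | zero => rfl
  | succ k ih =>
      show mulZ (pPowM (mulZ M M) k) (mulZ M M) = _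
      rw [ih]
      have : 2 * (k + 1) = (2 * k + 1) + 1 := by ring
      rw [this]
      show _ = mulZ (pPowM M (2 * k + 1)) M
      show _ = mulZ (mulZ (pPowM M (2 * k)) M) M
      rw [mulZ_assoc]

theorem powAuxB_eq (e : Nat) : ∀ (M R : (Int × Int) × (Int × Int)),
    powAuxB e M R = if e = 0 then R else redM (mulZ R (pPowM M e)) := by
  induction e using Nat.strong_induction_on with
  | _ e ih =>
    intro M R
    rw [powAuxB]
    by_cases he : e = 0
    · simp [he]
    · have hlt : e / 2 < e := Nat.div_lt_self (Nat.pos_of_ne_zero he) (by norm_num)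
      rw [ih (e / 2) hlt]
      simp only [he, if_false]
      by_cases h2 : e / 2 = 0
      · -- e = 1
        have he1 : e = 1 := by omega
        subst he1
        rw [if_pos rfl, if_pos (by norm_num : (1:Nat) % 2 = 1), matmulB_eq]
        have h1 : pPowM M 1 = M := by
          show mulZ (pPowM M 0) M = M
          show mulZ ((1,0),(0,1)) M = M
          exact one_mulZ M
        rw [h1]
      · simp only [h2, if_false]
        have hMM : MatEq (matmulB M M) (mulZ M M) := by
          rw [matmulB_eq]; exact matEq_redM _
        have hpow : MatEq (pPowM (matmulB M M) (e / 2)) (pPowM M (2 * (e / 2))) := by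
          have := pPowM_congr hMM (e / 2)
          rwa [pPowM_sq] at this
        by_cases hodd : e % 2 = 1
        · rw [if_pos hodd, matmulB_eq]
          have step1 : redM (mulZ (redM (mulZ R M)) (pPowM (matmulB M M) (e / 2)))
              = redM (mulZ (mulZ R M) (pPowM M (2 * (e / 2)))) :=
            redM_congr (matEq_mulZ (matEq_redM _) hpow)
          rw [step1]
          have step2 : mulZ (mulZ R M) (pPowM M (2 * (e / 2))) = mulZ R (pPowM M (2 * (e / 2) + 1)) := by
            rw [mulZ_assoc, pPowM_succ']
          rw [step2]
          have : 2 * (e / 2) + 1 = e := by omega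
          rw [this]
        · rw [if_neg hodd]
          have step1 : redM (mulZ R (pPowM (matmulB M M) (e / 2)))
              = redM (mulZ R (pPowM M (2 * (e / 2)))) :=
            redM_congr (matEq_mulZ (matEq_refl R) hpow)
          rw [step1]
          have : 2 * (e / 2) = e := by omega
          rw [this]

-- link between the scalar recurrence and pure matrix powers
theorem xy_pPow (n : Nat) :
    (xy n).1 % pvMod = ((pPowM ((2,1),(1,4)) n).1.1 + (pPowM ((2,1),(1,4)) n).2.1) % pvMod ∧
    (xy n).2 % pvMod = ((pPowM ((2,1),(1,4)) n).1.2 + (pPowM ((2,1),(1,4)) n).2.2) % pvMod := by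
  induction n with
  | zero => constructor <;> rfl
  | succ n ih =>
    obtain ⟨h1, h2⟩ := ih
    set P := pPowM ((2,1),(1,4)) n with hP
    have hsucc : pPowM ((2,1),(1,4)) (n+1) = mulZ P ((2,1),(1,4)) := rfl
    obtain ⟨⟨a, b⟩, c, d⟩ := P
    simp only [hsucc, mulZ] at *
    constructor
    · show (2 * (xy n).1 + (xy n).2) % pvMod % pvMod = _
      rw [modred]
      have : (a * 2 + b * 1) + (c * 2 + d * 1) = 2 * (a + c) + (b + d) := by ring
      simp only [this]
      exact modeq_add (modeq_mul rfl h1) h2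
    · show ((xy n).1 + 4 * (xy n).2) % pvMod % pvMod = _
      rw [modred]
      have : (a * 1 + b * 4) + (c * 1 + d * 4) = (a + c) + 4 * (b + d) := by ring
      simp only [this]
      exact modeq_add h1 (modeq_mul rfl h2)

-- ===== A-side characterization =====

theorem pyRange6 : PySem.List.pyRange 0 6 1 = [0, 1, 2, 3, 4, 5] := by decide

theorem dpT_length (h n : Nat) : (dpT h n).length = h + 1 := by
  simp [dpT]

theorem dpT_getD (h n k : Nat) (hk : k ≤ h) :
    (dpT h n).getD k [] = (if k = 0 then row0 else if k ≤ n then rowXY (k - 1) else zrow) := by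
  have hlen : k < (dpT h n).length := by rw [dpT_length]; omega
  rw [List.getD_eq_getElem _ _ hlen]
  simp [dpT]

theorem dpT_set (h n : Nat) (_hn : n + 1 ≤ h) :
    (dpT h n).set (n + 1) (rowXY n) = dpT h (n + 1) := by
  apply List.ext_getElem
  · simp [dpT_length]
  · intro k hk1 hk2
    simp only [dpT, List.getElem_set, List.getElem_map, List.getElem_range]
    by_cases hke : n + 1 = k
    · subst hke
      simp
    · simp only [hke, if_false]
      by_cases h0 : k = 0
      · simp [h0]
      · simp only [h0, if_false]
        split_ifs <;> first | rfl | omega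

theorem stepA_dpT (h n : Nat) (hn : n + 1 ≤ h) :
    stepA (dpT h n) ((n : Int) + 1) = dpT h (n + 1) := by
  have hi1 : (((n : Int) + 1) - 1).toNat = n := by omega
  have hi2 : ((n : Int) + 1).toNat = n + 1 := by omega
  unfold stepA
  simp only [hi1, hi2]
  rw [dpT_getD h n n (by omega), dpT_getD h n (n + 1) (by omega)]
  have hne : ¬ (n + 1 = 0) := by omega
  have hngt : ¬ (n + 1 ≤ n) := by omega
  simp only [hne, hngt, if_false]
  rw [← dpT_set h n hn]
  congr 1
  rw [pyRange6]
  cases n with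
  | zero =>
      decide
  | succ m =>
      have h0 : ¬ ((m + 1 : Nat) = 0) := by omega
      simp only [h0, if_false, Nat.le_refl, if_true, Nat.add_sub_cancel, rowXY, xy]
      generalize (xy m).1 = X
      generalize (xy m).2 = Y
      apply List.ext_getElem
      · rfl
      · intro i hi1 hi2
        have hi : i < 6 := by
          simpa using hi2
        interval_cases i
        · show PySem.Int.mod (X + Y + X) pvMod = (2 * X + Y) % pvMod
          rw [PySem.Int.mod_eq_emod_of_pos pvMod_pos]; congr 1; ring
        · show PySem.Int.mod (([X, Y, Y, X, Y, Y] : List Int).sum - X) pvMod = (X + 4 * Y) % pvMod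
          rw [PySem.Int.mod_eq_emod_of_pos pvMod_pos]; congr 1; simp [List.sum]; ring
        · show PySem.Int.mod (([X, Y, Y, X, Y, Y] : List Int).sum - X) pvMod = (X + 4 * Y) % pvMod
          rw [PySem.Int.mod_eq_emod_of_pos pvMod_pos]; congr 1; simp [List.sum]; ring
        · show PySem.Int.mod (Y + X + X) pvMod = (2 * X + Y) % pvMod
          rw [PySem.Int.mod_eq_emod_of_pos pvMod_pos]; congr 1; ring
        · show PySem.Int.mod (([X, Y, Y, X, Y, Y] : List Int).sum - X) pvMod = (X + 4 * Y) % pvMod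
          rw [PySem.Int.mod_eq_emod_of_pos pvMod_pos]; congr 1; simp [List.sum]; ring
        · show PySem.Int.mod (([X, Y, Y, X, Y, Y] : List Int).sum - X) pvMod = (X + 4 * Y) % pvMod
          rw [PySem.Int.mod_eq_emod_of_pos pvMod_pos]; congr 1; simp [List.sum]; ring

theorem init_dpT (h : Nat) :
    (((PySem.List.pyRange 0 ((h : Int) + 1) 1).map (fun _ =>
        (PySem.List.pyRange 0 6 1).map (fun _ => (0 : Int)))).set 0
      ((((PySem.List.pyRange 0 ((h : Int) + 1) 1).map (fun _ =>
        (PySem.List.pyRange 0 6 1).map (fun _ => (0 : Int)))).getD 0 []).set 3 1)) = dpT h 0 := by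
  have hz : (PySem.List.pyRange 0 6 1).map (fun _ => (0 : Int)) = zrow := by decide
  have hlen : ((PySem.List.pyRange 0 ((h : Int) + 1) 1).map (fun _ =>
      (PySem.List.pyRange 0 6 1).map (fun _ => (0 : Int)))).length = h + 1 := by
    simp [PySem.List.length_pyRange_one]
  have hget : ((PySem.List.pyRange 0 ((h : Int) + 1) 1).map (fun _ =>
      (PySem.List.pyRange 0 6 1).map (fun _ => (0 : Int)))).getD 0 [] = zrow := by
    rw [List.getD_eq_getElem _ _ (by omega)]
    simp [hz]
  rw [hget]
  have hrow : zrow.set 3 1 = row0 := by decide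
  rw [hrow]
  apply List.ext_getElem
  · simp [dpT_length]
  · intro k hk1 hk2
    simp only [List.getElem_set, List.getElem_map, dpT, List.getElem_range, hz]
    split_ifs with hk0 hk0' hle <;> first | rfl | omega

theorem foldA (h : Nat) : ∀ n, n ≤ h →
    (PySem.List.pyRange 1 ((n : Int) + 1) 1).foldl stepA (dpT h 0) = dpT h n := by
  intro n
  induction n with
  | zero =>
      intro _
      rw [PySem.List.pyRange_one_eq_nil (by omega)]
      rfl
  | succ m ih =>
      intro hm
      have hsplit : PySem.List.pyRange 1 (((m + 1 : Nat) : Int) + 1) 1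
          = PySem.List.pyRange 1 ((m : Int) + 1) 1 ++ [(m : Int) + 1] := by
        have : (((m + 1 : Nat) : Int) + 1) = ((m : Int) + 1) + 1 := by push_cast; ring
        rw [this, PySem.List.pyRange_one_succ_right (by omega)]
      rw [hsplit, List.foldl_append, ih (by omega)]
      simp only [List.foldl]
      exact stepA_dpT h m (by omega)

theorem A_char (n : Nat) : counting_towers (n : Int)
    = if n = 0 then 1 else ((xy (n - 1)).1 + (xy (n - 1)).2) % pvMod := by
  unfold counting_towers
  simp only []
  rw [init_dpT n, foldA n n le_rfl]
  have hn : ((n : Int)).toNat = n := by omega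
  rw [hn, dpT_getD n n n le_rfl, PySem.Int.mod_eq_emod_of_pos pvMod_pos]
  by_cases h0 : n = 0
  · subst h0
    norm_num [row0, List.getD, pvMod]
  · simp only [h0, if_false, le_refl, if_true]
    simp [rowXY, List.getD]

-- ===== B-side characterization =====

theorem powAuxB_I (e : Nat) :
    powAuxB e ((2,1),(1,4)) ((1,0),(0,1)) = redM (pPowM ((2,1),(1,4)) e) := by
  rw [powAuxB_eq]
  by_cases he : e = 0
  · subst he
    simp
    show _ = redM ((1,0),(0,1))
    norm_num [redM, pvMod]
  · simp only [he, if_false, one_mulZ]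

theorem B_char (n : Nat) (hn : 1 ≤ n) : counting_towers_alt (n : Int)
    = (((pPowM ((2,1),(1,4)) (n - 1)).1.1 + (pPowM ((2,1),(1,4)) (n - 1)).1.2)
        + ((pPowM ((2,1),(1,4)) (n - 1)).2.1 + (pPowM ((2,1),(1,4)) (n - 1)).2.2)) % pvMod := by
  unfold counting_towers_alt
  have hpos : ¬ ((n : Int) ≤ 0) := by omega
  simp only [hpos, if_false]
  have hnat : ((n : Int) - 1).toNat = n - 1 := by omega
  rw [hnat, powAuxB_I, PySem.Int.mod_eq_emod_of_pos pvMod_pos]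
  obtain ⟨⟨a, b⟩, c, d⟩ := pPowM ((2,1),(1,4)) (n - 1)
  simp only [redM]
  have e1 : a % pvMod + b % pvMod + c % pvMod + d % pvMod = (a % pvMod + b % pvMod) + (c % pvMod + d % pvMod) := by ring
  rw [e1]
  rw [modeq_add (modeq_add (modred a) (modred b)) (modeq_add (modred c) (modred d))]

-- ===== VERDICT (by name: the statement is the Claim_ definition above) =====
theorem counting_towers_spec : Claim_equal_counting_towers := by
  intro height _ hpre
  unfold Spec_counting_towers
  obtain ⟨n, rfl⟩ : ∃ n : Nat, height = (n : Int) :=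
    ⟨height.toNat, (Int.toNat_of_nonneg hpre).symm⟩
  by_cases h0 : n = 0
  · subst h0
    rw [A_char]
    simp [counting_towers_alt]
  · rw [A_char, B_char n (by omega)]
    simp only [h0, if_false]
    obtain ⟨hx, hy⟩ := xy_pPow (n - 1)
    rw [modeq_add hx hy]
    congr 1
    ring
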